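-- pv_equiv track=rewrite | github.com/RudraMantri123/Dementia.Project | src/agents/orchestrator.py | _detect_crisis_indicators
-- ===== SOURCE A (Python) =====
-- def _detect_crisis_indicators(user_input: str) -> bool:
--     """
--     Detect crisis indicators in user input.
--
--     Args:
--         user_input: User's message
--
--     Returns:
--         True if crisis indicators detected
--     """
--     crisis_keywords = [
--         'very low', 'depressed', 'hopeless', 'can\'t cope', 'overwhelmed',
--         'suicidal', 'end my life', 'kill myself', 'want to die',
--         'can\'t adjust', 'social isolation', 'lonely', 'isolated',
--         'crisis', 'emergency', 'help me', 'desperate'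
--     ]
--
--     user_lower = user_input.lower()
--     return any(keyword in user_lower for keyword in crisis_keywords)
-- ===== SOURCE B (Python) =====
-- def _detect_crisis_indicators(user_input: str) -> bool:
--     """Single left-to-right scan over the lowered text: at each start position,
--     test whether any crisis keyword begins there (str.startswith with a start
--     offset), instead of one full substring-containment pass per keyword."""
--     crisis_keywords = [
--         'very low', 'depressed', 'hopeless', 'can\'t cope', 'overwhelmed',
--         'suicidal', 'end my life', 'kill myself', 'want to die',
--         'can\'t adjust', 'social isolation', 'lonely', 'isolated',
--         'crisis', 'emergency', 'help me', 'desperate'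
--     ]
--     text = user_input.lower()
--     for i in range(len(text) + 1):
--         if any(text.startswith(kw, i) for kw in crisis_keywords):
--             return True
--     return False
-- ===== Notes on version B (the rewrite author's own statement) =====
-- stated objective: alternative
-- what changed: Replaces the per-keyword substring-containment test (one full scan of the text for each keyword) with a single position-indexed scan of the lowered text that at each start offset checks whether any keyword begins there via startswith.
import Mathlib
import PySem

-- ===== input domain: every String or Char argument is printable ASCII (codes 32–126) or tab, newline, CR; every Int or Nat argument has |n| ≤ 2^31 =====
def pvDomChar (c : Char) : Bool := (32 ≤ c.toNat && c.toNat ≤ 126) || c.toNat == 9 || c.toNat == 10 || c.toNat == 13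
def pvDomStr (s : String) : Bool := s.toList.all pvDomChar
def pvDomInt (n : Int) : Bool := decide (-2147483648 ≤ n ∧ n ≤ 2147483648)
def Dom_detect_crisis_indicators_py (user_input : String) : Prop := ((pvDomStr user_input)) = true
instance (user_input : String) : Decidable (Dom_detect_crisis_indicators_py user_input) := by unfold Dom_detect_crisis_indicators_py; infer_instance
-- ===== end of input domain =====

-- B replaces per-keyword substring containment with one position-indexed scan testing keyword prefixes at each offset (alternative decomposition, same cost).


-- ===== PORT A =====
def pvCrisisKeywordsA : List String :=
  ["very low", "depressed", "hopeless", "can't cope", "overwhelmed",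
   "suicidal", "end my life", "kill myself", "want to die",
   "can't adjust", "social isolation", "lonely", "isolated",
   "crisis", "emergency", "help me", "desperate"]

def detect_crisis_indicators_py (user_input : String) : Bool :=
  let user_lower := PySem.Str.lower user_input
  pvCrisisKeywordsA.any (fun keyword => PySem.Str.isIn keyword user_lower)

-- ===== PORT B =====
def pvCrisisKeywordsB : List (List Char) :=
  ["very low".toList, "depressed".toList, "hopeless".toList, "can't cope".toList,
   "overwhelmed".toList, "suicidal".toList, "end my life".toList, "kill myself".toList,
   "want to die".toList, "can't adjust".toList, "social isolation".toList,
   "lonely".toList, "isolated".toList, "crisis".toList, "emergency".toList,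
   "help me".toList, "desperate".toList]

-- the 'for i in range(len(text)+1)' loop of Source B: scan suffixes left to right,
-- at each position testing whether some keyword starts there
def pvScanFrom (kws : List (List Char)) : List Char → Bool
  | [] => kws.any (fun kw => kw.isPrefixOf ([] : List Char))
  | c :: rest => kws.any (fun kw => kw.isPrefixOf (c :: rest)) || pvScanFrom kws rest

def detect_crisis_indicators_py_alt (user_input : String) : Bool :=
  pvScanFrom pvCrisisKeywordsB (PySem.Chars.lower user_input.toList)

-- ===== PRECONDITION & SPEC =====
def Spec_detect_crisis_indicators_py (user_input : String) (out : Bool) : Prop := out = detect_crisis_indicators_py_alt user_input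
instance (user_input : String) (out : Bool) : Decidable (Spec_detect_crisis_indicators_py user_input out) := by unfold Spec_detect_crisis_indicators_py; infer_instance

-- ===== CLAIM (what is proved, stated in full; the proofs are below) =====
def Claim_equal_detect_crisis_indicators_py : Prop := ∀ (user_input : String), Dom_detect_crisis_indicators_py user_input → Spec_detect_crisis_indicators_py user_input (detect_crisis_indicators_py user_input)

-- ===== LEMMAS AND PROOFS =====

-- the position scan finds exactly the keywords that occur as an infix
lemma pvScanFrom_iff (kws : List (List Char)) (cs : List Char) :
    pvScanFrom kws cs = true ↔ ∃ kw ∈ kws, kw <:+: cs := by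
  induction cs with
  | nil => simp [pvScanFrom, List.any_eq_true, List.isPrefixOf_iff_prefix]
  | cons c rest ih =>
    simp only [pvScanFrom, Bool.or_eq_true, List.any_eq_true,
      List.isPrefixOf_iff_prefix, ih, List.infix_cons_iff]
    constructor
    · rintro (⟨kw, hm, hp⟩ | ⟨kw, hm, hi⟩)
      · exact ⟨kw, hm, Or.inl hp⟩
      · exact ⟨kw, hm, Or.inr hi⟩
    · rintro ⟨kw, hm, hp | hi⟩
      · exact Or.inl ⟨kw, hm, hp⟩
      · exact Or.inr ⟨kw, hm, hi⟩

lemma pvKwB_eq : pvCrisisKeywordsB = pvCrisisKeywordsA.map String.toList := by decide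

-- ===== VERDICT (by name: the statement is the Claim_ definition above) =====
theorem detect_crisis_indicators_py_spec : Claim_equal_detect_crisis_indicators_py := by
  intro s _
  unfold Spec_detect_crisis_indicators_py detect_crisis_indicators_py detect_crisis_indicators_py_alt
  rw [Bool.eq_iff_iff, pvScanFrom_iff, pvKwB_eq]
  simp only [List.any_eq_true, PySem.Str.isIn_iff_infix, ← PySem.Str.toList_lower,
    List.mem_map]
  constructor
  · rintro ⟨kw, hm, hi⟩; exact ⟨kw.toList, ⟨kw, hm, rfl⟩, hi⟩
  · rintro ⟨l, ⟨kw, hm, rfl⟩, hi⟩; exact ⟨kw, hm, hi⟩
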